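-- pv_equiv track=rewrite | github.com/ysyJoyce027/COMP1010 | A2_Q1Part1_25089015d_YAOSiYu.py | sort_digits
-- ===== SOURCE A (Python) =====
-- def sort_digits(n,b):
--     str_n=str(n)
--     if len(str_n)<=4:
--         add_zero= 4-len(str_n)
--         N=str(0)*add_zero+str_n
--         digits=list(N)
--         alist=[]
--         if b==1:
--             while digits != []:
--                 max_num=digits[0]
--                 for num in digits:
--                     if num>max_num:
--                         max_num=num
--                 alist=alist+[max_num]
--                 digits.remove(max_num)
--         elif b==0:
--             while digits != []:
--                 min_num=digits[0]
--                 for num in digits: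
--                     if num<min_num:
--                         min_num=num
--                 alist=alist+[min_num]
--                 digits.remove(min_num)
--         result_str="".join(alist)
--         return int(result_str)
-- ===== SOURCE B (Python) =====
-- def sort_digits(n, b):
--     str_n = str(n)
--     if len(str_n) <= 4:
--         N = "0" * (4 - len(str_n)) + str_n
--         if b == 1:
--             alist = sorted(N, reverse=True)
--         elif b == 0:
--             alist = sorted(N)
--         else:
--             alist = []
--         return int("".join(alist))
-- ===== Notes on version B (the rewrite author's own statement) =====
-- stated objective: idiomatic
-- what changed: The two hand-written selection-sort while-loops (repeated max/min scans plus list.remove) are replaced by single calls to the built-in sorted() with reverse=True/False.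
import Mathlib
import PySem

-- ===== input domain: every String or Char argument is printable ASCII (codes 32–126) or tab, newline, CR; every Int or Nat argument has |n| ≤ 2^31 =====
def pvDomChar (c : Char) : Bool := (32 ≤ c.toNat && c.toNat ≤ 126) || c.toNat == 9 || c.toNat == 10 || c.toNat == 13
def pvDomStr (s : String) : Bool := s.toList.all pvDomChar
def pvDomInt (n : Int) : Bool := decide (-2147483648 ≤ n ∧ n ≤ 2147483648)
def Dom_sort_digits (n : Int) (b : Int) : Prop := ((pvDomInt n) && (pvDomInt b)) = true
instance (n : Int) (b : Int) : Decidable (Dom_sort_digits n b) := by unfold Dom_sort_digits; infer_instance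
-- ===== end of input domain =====

-- B replaces A's two selection-sort while-loops by single calls to the built-in sort (idiomatic).

-- ===== PORT A =====
-- termination helper for the while-loops: list.remove shortens the list
theorem pv_remove?_length {α : Type} [BEq α] [LawfulBEq α] (xs rest : List α) (v : α)
    (h : PySem.List.remove? xs v = some rest) : rest.length < xs.length := by
  have hv : v ∈ xs := by
    by_contra hn
    rw [(PySem.List.remove?_eq_none_iff xs v).mpr hn] at h
    simp at h
  rw [PySem.List.remove?_eq_some_erase xs v hv] at h
  cases h
  have h1 := List.length_erase_of_mem hv
  have h2 := List.length_pos_of_mem hv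
  omega

-- while digits != []: max_num = digits[0]; for num in digits: if num>max_num: max_num=num;
--   alist = alist + [max_num]; digits.remove(max_num)
def selDesc (digits : List Char) (alist : List Char) : List Char :=
  match digits with
  | [] => alist
  | d :: t =>
    let m := (d :: t).foldl (fun mx num => if mx < num then num else mx) d
    match h : PySem.List.remove? (d :: t) m with
    | some rest => selDesc rest (alist ++ [m])
    | none => alist
termination_by digits.length
decreasing_by exact pv_remove?_length _ _ _ h

-- the b==0 twin with min
def selAsc (digits : List Char) (alist : List Char) : List Char :=
  match digits with
  | [] => alist
  | d :: t =>
    let m := (d :: t).foldl (fun mn num => if num < mn then num else mn) d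
    match h : PySem.List.remove? (d :: t) m with
    | some rest => selAsc rest (alist ++ [m])
    | none => alist
termination_by digits.length
decreasing_by exact pv_remove?_length _ _ _ h

def sort_digits (n : Int) (b : Int) : Int :=
  let str_n := PySem.Int.toChars n
  if str_n.length ≤ 4 then
    let add_zero : Int := 4 - (str_n.length : Int)
    let N := PySem.List.pyRepeat ['0'] add_zero ++ str_n
    let digits := N
    let alist : List Char :=
      if b = 1 then selDesc digits []
      else if b = 0 then selAsc digits []
      else []
    -- int("".join(alist)); Python raises ValueError when the parse fails (outside Pre_)
    (PySem.Int.ofChars? alist).getD 0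
  else 0  -- Python returns None here (outside Pre_)

-- ===== PORT B =====
def sort_digits_alt (n : Int) (b : Int) : Int :=
  let str_n := PySem.Int.toChars n
  if str_n.length ≤ 4 then
    let N := PySem.List.pyRepeat ['0'] (4 - (str_n.length : Int)) ++ str_n
    let alist : List Char :=
      if b = 1 then PySem.List.sorted N (fun x => x) true
      else if b = 0 then PySem.List.sorted N (fun x => x) false
      else []
    (PySem.Int.ofChars? alist).getD 0
  else 0

-- ===== PRECONDITION & SPEC =====
-- Pre_ excludes exactly the inputs where the Python A does not return an int:
-- len(str(n)) > 4 (A returns None), b outside {0,1} (int('') ValueError),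
-- and negative n with b == 1 (the '-' sorts last, int(...) ValueError).
def Pre_sort_digits (n : Int) (b : Int) : Prop :=
  (0 ≤ n ∧ n ≤ 9999 ∧ (b = 0 ∨ b = 1)) ∨ (-999 ≤ n ∧ n ≤ -1 ∧ b = 0)
instance (n : Int) (b : Int) : Decidable (Pre_sort_digits n b) := by
  unfold Pre_sort_digits; infer_instance
def pvWitness_sort_digits : Int × Int := (3021, 1)

def Spec_sort_digits (n : Int) (b : Int) (out : Int) : Prop := out = sort_digits_alt n b
instance (n : Int) (b : Int) (out : Int) : Decidable (Spec_sort_digits n b out) := by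
  unfold Spec_sort_digits; infer_instance

-- ===== CLAIM (what is proved, stated in full; the proofs are below) =====
def Claim_equal_sort_digits : Prop := ∀ (n : Int) (b : Int), Dom_sort_digits n b → Pre_sort_digits n b → Spec_sort_digits n b (sort_digits n b)

-- ===== LEMMAS AND PROOFS =====

-- the running-max fold picks an element of the list …
theorem pv_fmax_mem (t : List Char) (a : Char) :
    t.foldl (fun mx num => if mx < num then num else mx) a ∈ a :: t := by
  induction t generalizing a with
  | nil => simp [List.foldl]
  | cons x xs ih =>
    simp only [List.foldl]
    rcases List.mem_cons.mp (ih (if a < x then x else a)) with h | h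
    · rw [h]; split_ifs <;> simp
    · simp [h]

-- … and it bounds every element of the list from above
theorem pv_fmax_ge (t : List Char) (a : Char) :
    a ≤ t.foldl (fun mx num => if mx < num then num else mx) a ∧
      ∀ y ∈ t, y ≤ t.foldl (fun mx num => if mx < num then num else mx) a := by
  induction t generalizing a with
  | nil => simp
  | cons x xs ih =>
    obtain ⟨h1, h2⟩ := ih (if a < x then x else a)
    constructor
    · refine le_trans ?_ h1
      by_cases hc : a < x
      · simp [hc, le_of_lt hc]
      · simp [hc]
    · intro y hy
      rcases List.mem_cons.mp hy with h | h
      · rw [h]; refine le_trans ?_ h1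
        by_cases hc : a < x
        · simp [hc]
        · simp [hc, not_lt.mp hc]
      · exact h2 y h

-- the running-min twin
theorem pv_fmin_mem (t : List Char) (a : Char) :
    t.foldl (fun mn num => if num < mn then num else mn) a ∈ a :: t := by
  induction t generalizing a with
  | nil => simp [List.foldl]
  | cons x xs ih =>
    simp only [List.foldl]
    rcases List.mem_cons.mp (ih (if x < a then x else a)) with h | h
    · rw [h]; split_ifs <;> simp
    · simp [h]

theorem pv_fmin_le (t : List Char) (a : Char) :
    t.foldl (fun mn num => if num < mn then num else mn) a ≤ a ∧
      ∀ y ∈ t, t.foldl (fun mn num => if num < mn then num else mn) a ≤ y := by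
  induction t generalizing a with
  | nil => simp
  | cons x xs ih =>
    obtain ⟨h1, h2⟩ := ih (if x < a then x else a)
    constructor
    · refine le_trans h1 ?_
      by_cases hc : x < a
      · simp [hc, le_of_lt hc]
      · simp [hc]
    · intro y hy
      rcases List.mem_cons.mp hy with h | h
      · rw [h]; refine le_trans h1 ?_
        by_cases hc : x < a
        · simp [hc]
        · simp [hc, not_lt.mp hc]
      · exact h2 y h

-- a key-decreasing rearrangement of xs is sorted(xs, reverse=True) (≥, duplicates allowed)
theorem pv_sorted_rev_eq_of_perm_of_pairwise_ge (xs ys : List Char)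
    (hp : ys.Perm xs) (hs : ys.Pairwise (fun a b => b ≤ a)) :
    PySem.List.sorted xs (fun x => x) true = ys := by
  have h1 : (PySem.List.sorted xs (fun x => x) true).reverse.Perm ys.reverse := by
    exact (List.reverse_perm _).trans
      ((((PySem.List.sorted_perm xs (fun x => x) true).trans hp.symm).trans
        (List.reverse_perm ys).symm))
  have hs1 : (PySem.List.sorted xs (fun x => x) true).reverse.Pairwise
      (fun a b => (fun x => x) a ≤ (fun x => x) b) := by
    rw [List.pairwise_reverse]
    exact PySem.List.sorted_pairwise_rev xs (fun x => x)
  have hs2 : ys.reverse.Pairwise (fun a b => (fun x => x) a ≤ (fun x => x) b) := by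
    rw [List.pairwise_reverse]; exact hs
  have := PySem.List.eq_of_perm_of_pairwise_le_of_injective (fun x => x)
    (fun _ _ h => h) h1 hs1 hs2
  exact List.reverse_injective this

-- A's max-selection loop builds sorted(l, reverse=True)
theorem selDesc_eq (l acc : List Char) :
    selDesc l acc = acc ++ PySem.List.sorted l (fun x => x) true := by
  induction hn : l.length using Nat.strong_induction_on generalizing l acc with
  | _ k ih =>
    match l with
    | [] => simp [selDesc, PySem.List.sorted]
    | d :: t =>
      set m := (d :: t).foldl (fun mx num => if mx < num then num else mx) d with hm
      have hmem : m ∈ d :: t := by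
        have := pv_fmax_mem t d
        simp only [List.foldl] at this ⊢
        simpa [hm, List.foldl] using this
      have hge : ∀ y ∈ d :: t, y ≤ m := by
        intro y hy
        obtain ⟨h1, h2⟩ := pv_fmax_ge t d
        rcases List.mem_cons.mp hy with h | h
        · rw [h]
          simpa [hm, List.foldl] using h1
        · have := h2 y h
          simpa [hm, List.foldl] using this
      have hrem : PySem.List.remove? (d :: t) m = some ((d :: t).erase m) :=
        PySem.List.remove?_eq_some_erase (d :: t) m hmem
      have hstep : selDesc (d :: t) acc = selDesc ((d :: t).erase m) (acc ++ [m]) := by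
        rw [selDesc]
        simp only [← hm]
        split
        · next rest h => rw [hrem] at h; cases h; rfl
        · next h => rw [hrem] at h; cases h
      have hlen : ((d :: t).erase m).length < k := by
        rw [← hn]
        have h1 := List.length_erase_of_mem hmem
        have h2 := List.length_pos_of_mem hmem
        omega
      have hsorted : PySem.List.sorted (d :: t) (fun x => x) true
          = m :: PySem.List.sorted ((d :: t).erase m) (fun x => x) true := by
        apply pv_sorted_rev_eq_of_perm_of_pairwise_ge
        · exact (List.Perm.cons m (PySem.List.sorted_perm _ _ _)).trans
            (List.perm_cons_erase hmem).symm
        · constructor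
          · intro y hy
            have : y ∈ (d :: t).erase m := (PySem.List.mem_sorted _ _ _ _).mp hy
            exact hge y (List.mem_of_mem_erase this)
          · exact PySem.List.sorted_pairwise_rev _ _
      rw [hstep, ih _ hlen _ _ rfl, hsorted]
      simp
      
-- A's min-selection loop builds sorted(l)
theorem selAsc_eq (l acc : List Char) :
    selAsc l acc = acc ++ PySem.List.sorted l (fun x => x) false := by
  induction hn : l.length using Nat.strong_induction_on generalizing l acc with
  | _ k ih =>
    match l with
    | [] => simp [selAsc, PySem.List.sorted]
    | d :: t =>
      set m := (d :: t).foldl (fun mn num => if num < mn then num else mn) d with hm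
      have hmem : m ∈ d :: t := by
        have := pv_fmin_mem t d
        simpa [hm, List.foldl] using this
      have hle : ∀ y ∈ d :: t, m ≤ y := by
        intro y hy
        obtain ⟨h1, h2⟩ := pv_fmin_le t d
        rcases List.mem_cons.mp hy with h | h
        · rw [h]
          simpa [hm, List.foldl] using h1
        · have := h2 y h
          simpa [hm, List.foldl] using this
      have hrem : PySem.List.remove? (d :: t) m = some ((d :: t).erase m) :=
        PySem.List.remove?_eq_some_erase (d :: t) m hmem
      have hstep : selAsc (d :: t) acc = selAsc ((d :: t).erase m) (acc ++ [m]) := by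
        rw [selAsc]
        simp only [← hm]
        split
        · next rest h => rw [hrem] at h; cases h; rfl
        · next h => rw [hrem] at h; cases h
      have hlen : ((d :: t).erase m).length < k := by
        rw [← hn]
        have h1 := List.length_erase_of_mem hmem
        have h2 := List.length_pos_of_mem hmem
        omega
      have hsorted : PySem.List.sorted (d :: t) (fun x => x) false
          = m :: PySem.List.sorted ((d :: t).erase m) (fun x => x) false := by
        apply PySem.List.sorted_id_eq_of_perm_of_pairwise
        · exact (List.Perm.cons m (PySem.List.sorted_perm _ _ _)).trans
            (List.perm_cons_erase hmem).symm
        · constructor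
          · intro y hy
            have : y ∈ (d :: t).erase m := (PySem.List.mem_sorted _ _ _ _).mp hy
            exact hle y (List.mem_of_mem_erase this)
          · exact PySem.List.sorted_pairwise _ _
      rw [hstep, ih _ hlen _ _ rfl, hsorted]
      simp

-- the two ports agree on every input (Pre_ only marks where the Python A returns an int)
theorem pv_ports_eq (n b : Int) : sort_digits n b = sort_digits_alt n b := by
  unfold sort_digits sort_digits_alt
  simp only
  split
  · split
    · rw [selDesc_eq]; simp
    · split
      · rw [selAsc_eq]; simp
      · rfl
  · rfl

-- ===== VERDICT (by name: the statement is the Claim_ definition above) =====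
theorem sort_digits_spec : Claim_equal_sort_digits := by
  intro n b _ _
  unfold Spec_sort_digits
  exact pv_ports_eq n b
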